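-- pv_equiv track=rewrite | github.com/BUSH222/endlessttt | main.py | find_five_pieces
-- ===== SOURCE A (Python) =====
-- def find_five_pieces(pieces):
--     rows = {}
--     cols = {}
--     diags = {}
--     for x, y, color in pieces:
--         rows.setdefault(x, []).append((x, y, color))
--         cols.setdefault(y, []).append((x, y, color))
--         diags.setdefault(x + y, []).append((x, y, color))
--         diags.setdefault(x - y, []).append((x, y, color))
--     for d in rows, cols, diags:
--         for k in d:
--             if len(d[k]) >= 5:
--                 for i in range(len(d[k]) - 4):
--                     if all(c == d[k][i][2] for _, _, c in d[k][i:i+5]):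
--                         return d[k][i:i+5]
--     return None
-- ===== SOURCE B (Python) =====
-- def find_five_pieces(pieces):
--     rows = {}
--     cols = {}
--     diags = {}
--     for x, y, color in pieces:
--         p = (x, y, color)
--         for d, k in ((rows, x), (cols, y), (diags, x + y), (diags, x - y)):
--             d[k] = d.get(k, []) + [p]
--     for d in (rows, cols, diags):
--         for group in d.values():
--             run = []
--             for p in group:
--                 if run and p[2] == run[-1][2]:
--                     run.append(p)
--                 else:
--                     run = [p]
--                 if len(run) == 5:
--                     return run
--     return None
-- ===== Notes on version B (the rewrite author's own statement) =====
-- stated objective: alternative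
-- what changed: B replaces A's per-group sliding-window check (all five colors equal at each window start) by a single-pass run-length scan that maintains the current trailing same-color run and returns it as soon as it reaches length 5; the grouping pass is kept but written with d.get-based updates.
import Mathlib
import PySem

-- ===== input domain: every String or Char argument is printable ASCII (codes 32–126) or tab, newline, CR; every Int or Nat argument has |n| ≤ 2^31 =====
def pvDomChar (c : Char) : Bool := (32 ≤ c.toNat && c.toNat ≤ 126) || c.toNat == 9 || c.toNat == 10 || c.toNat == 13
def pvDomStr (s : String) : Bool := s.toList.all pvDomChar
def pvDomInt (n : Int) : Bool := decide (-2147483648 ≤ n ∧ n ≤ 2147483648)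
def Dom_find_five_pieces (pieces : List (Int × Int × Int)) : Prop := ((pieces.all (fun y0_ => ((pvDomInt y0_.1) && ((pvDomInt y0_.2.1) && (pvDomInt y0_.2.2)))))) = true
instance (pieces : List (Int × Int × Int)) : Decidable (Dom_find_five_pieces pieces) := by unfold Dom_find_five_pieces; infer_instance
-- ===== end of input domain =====

-- B replaces A's per-group sliding-window 'all()' check by a single-pass run-length scan
-- that keeps the current same-color run and returns it when it reaches 5 (objective: alternative).

-- ===== PORT A =====
-- inner scan of one group: 'if len(g)>=5: for i in range(len(g)-4): if all(...): return g[i:i+5]'.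
-- i is nonnegative and in range, so g[i:i+5] = (g.drop i).take 5 and g[i] = (g.drop i).headD _ exactly.
def pvScanA (l : List (Int × Int × Int)) : Option (List (Int × Int × Int)) :=
  if 5 ≤ l.length then
    (List.range (l.length - 4)).findSome? (fun i =>
      if ((l.drop i).take 5).all (fun q => q.2.2 == ((l.drop i).headD (0, 0, 0)).2.2)
      then some ((l.drop i).take 5) else none)
  else none

-- the grouping loop: rows/cols/diags with setdefault(k, []).append(p) = insert k (getD k [] ++ [p])
def pvGroupA (pieces : List (Int × Int × Int)) :
    PySem.Dict Int (List (Int × Int × Int)) × PySem.Dict Int (List (Int × Int × Int)) ×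
      PySem.Dict Int (List (Int × Int × Int)) :=
  pieces.foldl
    (fun s p =>
      let rows := s.1.insert p.1 (s.1.getD p.1 [] ++ [p])
      let cols := s.2.1.insert p.2.1 (s.2.1.getD p.2.1 [] ++ [p])
      let diags := s.2.2.insert (p.1 + p.2.1) (s.2.2.getD (p.1 + p.2.1) [] ++ [p])
      let diags2 := diags.insert (p.1 - p.2.1) (diags.getD (p.1 - p.2.1) [] ++ [p])
      (rows, cols, diags2))
    (PySem.Dict.empty, PySem.Dict.empty, PySem.Dict.empty)

-- 'for k in d: ... d[k]' iterates (k, d[k]) in insertion order = d.items (keys are unique)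
def find_five_pieces (pieces : List (Int × Int × Int)) : Option (List (Int × Int × Int)) :=
  let g := pvGroupA pieces
  [g.1, g.2.1, g.2.2].findSome? (fun d => d.items.findSome? (fun kv => pvScanA kv.2))

-- ===== PORT B =====
-- d[k] = d.get(k, []) + [p]
def pvAdd (d : PySem.Dict Int (List (Int × Int × Int))) (k : Int) (p : Int × Int × Int) :
    PySem.Dict Int (List (Int × Int × Int)) :=
  d.insert k (d.getD k [] ++ [p])

def pvGroupB (pieces : List (Int × Int × Int)) :
    PySem.Dict Int (List (Int × Int × Int)) × PySem.Dict Int (List (Int × Int × Int)) ×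
      PySem.Dict Int (List (Int × Int × Int)) :=
  pieces.foldl
    (fun s p =>
      (pvAdd s.1 p.1 p, pvAdd s.2.1 p.2.1 p,
        pvAdd (pvAdd s.2.2 (p.1 + p.2.1) p) (p.1 - p.2.1) p))
    (PySem.Dict.empty, PySem.Dict.empty, PySem.Dict.empty)

-- run-length scan: 'run' is the current trailing same-color run (run[-1] = run.getLast?)
def pvScanB : List (Int × Int × Int) → List (Int × Int × Int) → Option (List (Int × Int × Int))
  | _, [] => none
  | run, p :: rest =>
    let run' := match run.getLast? with
      | some q => if p.2.2 == q.2.2 then run ++ [p] else [p]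
      | none => [p]
    if run'.length = 5 then some run' else pvScanB run' rest

def find_five_pieces_alt (pieces : List (Int × Int × Int)) : Option (List (Int × Int × Int)) :=
  let g := pvGroupB pieces
  [g.1, g.2.1, g.2.2].findSome? (fun d => d.values.findSome? (fun grp => pvScanB [] grp))

-- ===== PRECONDITION & SPEC =====
def Spec_find_five_pieces (pieces : List (Int × Int × Int)) (out : Option (List (Int × Int × Int))) : Prop := out = find_five_pieces_alt pieces
instance (pieces : List (Int × Int × Int)) (out : Option (List (Int × Int × Int))) : Decidable (Spec_find_five_pieces pieces out) := by unfold Spec_find_five_pieces; infer_instance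

-- ===== CLAIM (what is proved, stated in full; the proofs are below) =====
def Claim_equal_find_five_pieces : Prop := ∀ (pieces : List (Int × Int × Int)), Dom_find_five_pieces pieces → Spec_find_five_pieces pieces (find_five_pieces pieces)

-- ===== LEMMAS AND PROOFS =====

-- common reference scan: first all-same-color window of 5, peeling one element at a time
def pvF : List (Int × Int × Int) → Option (List (Int × Int × Int))
  | [] => none
  | p :: rest =>
    if ((p :: rest).take 5).length = 5 ∧ ((p :: rest).take 5).all (fun q => q.2.2 == p.2.2)
    then some ((p :: rest).take 5) else pvF rest

theorem pvF_short (l : List (Int × Int × Int)) (h : l.length < 5) : pvF l = none := by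
  induction l with
  | nil => rfl
  | cons p rest ih =>
    simp only [pvF]
    rw [if_neg, ih (by simp at h ⊢; omega)]
    intro ⟨h1, _⟩
    have := List.length_take_le 5 (p :: rest)
    have : ((p :: rest).take 5).length ≤ (p :: rest).length := List.length_take_le' ..
    omega

theorem pvScanA_eq_pvF (l : List (Int × Int × Int)) : pvScanA l = pvF l := by
  induction l with
  | nil => rfl
  | cons p rest ih =>
    by_cases h5 : 5 ≤ (p :: rest).length
    · have h5' : 4 ≤ rest.length := by simp at h5; omega
      have hlen : (p :: rest).length - 4 = (rest.length - 4) + 1 := by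
        simp; omega
      have htk : ((p :: rest).take 5).length = 5 := by
        rw [List.length_take]; simp; omega
      have htail : List.findSome? (fun i =>
          if ((List.take 5 (List.drop i rest)).all fun q =>
              q.2.2 == ((List.drop i rest).headD (0,0,0)).2.2) = true
          then some (List.take 5 (List.drop i rest)) else none)
          (List.range (rest.length - 4)) = pvScanA rest := by
        simp only [pvScanA]
        by_cases h5'' : 5 ≤ rest.length
        · rw [if_pos h5'']
        · have h0 : rest.length - 4 = 0 := by omega
          rw [h0, if_neg h5'']; rfl
      simp only [pvScanA, if_pos h5, hlen, List.range_succ_eq_map, List.findSome?_cons,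
        List.findSome?_map, Function.comp_def, List.drop_succ_cons]
      rw [htail]
      simp only [List.drop_zero, List.headD_cons]
      by_cases hall : ((List.take 5 (p :: rest)).all fun q => q.2.2 == p.2.2) = true
      · rw [if_pos hall]
        show some ((p :: rest).take 5) = pvF (p :: rest)
        simp only [pvF]
        rw [if_pos ⟨htk, hall⟩]
      · rw [if_neg hall]
        show pvScanA rest = pvF (p :: rest)
        simp only [pvF]
        rw [if_neg (fun h => hall h.2)]
        exact ih
    · simp only [pvScanA, if_neg h5]
      rw [pvF_short _ (by omega)]

-- skip lemma: a too-short all-c run followed by a color break contributes no window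
theorem pvF_skip (c : Int) (p : Int × Int × Int) (rest : List (Int × Int × Int))
    (hp : p.2.2 ≠ c) : ∀ run : List (Int × Int × Int), (∀ q ∈ run, q.2.2 = c) →
    run.length ≤ 4 → pvF (run ++ p :: rest) = pvF (p :: rest) := by
  intro run
  induction run with
  | nil => intro _ _; rfl
  | cons q run2 ih =>
    intro hall hlen
    have hq : q.2.2 = c := hall q (List.mem_cons_self ..)
    have hmem : p ∈ ((q :: run2) ++ p :: rest).take 5 := by
      rw [List.take_append, List.take_of_length_le (by simp at hlen ⊢; omega)]
      obtain ⟨m, hm⟩ : ∃ m, 5 - (q :: run2).length = m + 1 :=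
        ⟨4 - (q :: run2).length, by simp at hlen ⊢; omega⟩
      rw [hm, List.take_succ_cons]
      exact List.mem_append_right _ (List.mem_cons_self ..)
    have step : pvF (q :: (run2 ++ p :: rest)) =
        if ((q :: (run2 ++ p :: rest)).take 5).length = 5 ∧
            (((q :: (run2 ++ p :: rest)).take 5).all fun x => x.2.2 == q.2.2) = true
        then some ((q :: (run2 ++ p :: rest)).take 5)
        else pvF (run2 ++ p :: rest) := rfl
    rw [List.cons_append, step, if_neg]
    · exact ih (fun r hr => hall r (List.mem_cons_of_mem _ hr)) (by simp at hlen ⊢; omega)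
    · rintro ⟨-, h2⟩
      rw [List.all_eq_true] at h2
      have := h2 p (by simpa using hmem)
      exact hp (by rw [beq_iff_eq] at this; rw [this, hq])

-- main invariant for B's scan
theorem pvScanB_run (rest : List (Int × Int × Int)) : ∀ (run : List (Int × Int × Int)) (c : Int),
    run ≠ [] → run.length ≤ 4 → (∀ q ∈ run, q.2.2 = c) →
    pvScanB run rest = pvF (run ++ rest) := by
  induction rest with
  | nil =>
    intro run c _ hlen _
    simp only [pvScanB, List.append_nil]
    exact (pvF_short run (by omega)).symm
  | cons p rest' ih =>
    intro run c hne hlen hall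
    obtain ⟨q, hq⟩ : ∃ q, run.getLast? = some q := by
      cases run with
      | nil => exact absurd rfl hne
      | cons r0 run2 => exact ⟨_, List.getLast?_eq_some_getLast (by simp)⟩
    have hqc : q.2.2 = c := hall q (List.mem_of_getLast? hq)
    simp only [pvScanB, hq]
    by_cases hpq : (p.2.2 == q.2.2) = true
    · have hpc : p.2.2 = c := by rw [beq_iff_eq] at hpq; rw [hpq, hqc]
      rw [if_pos hpq]
      by_cases h5 : (run ++ [p]).length = 5
      · rw [if_pos h5]
        cases run with
        | nil => exact absurd rfl hne
        | cons r0 run2 =>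
          have hr0 : r0.2.2 = c := hall r0 (List.mem_cons_self ..)
          have hlen4 : (r0 :: run2).length = 4 := by simp at h5 ⊢; omega
          have htake : ((r0 :: run2) ++ p :: rest').take 5 = (r0 :: run2) ++ [p] := by
            rw [List.take_append, List.take_of_length_le (by omega), hlen4]
            rfl
          have hall5 : ((r0 :: run2 ++ [p]).all fun q => q.2.2 == r0.2.2) = true := by
            rw [List.all_eq_true]
            intro x hx
            rcases (by simpa using hx : x = r0 ∨ x ∈ run2 ∨ x = p) with h | h | h
            · rw [h, beq_self_eq_true]
            · rw [beq_iff_eq, hall x (List.mem_cons_of_mem _ h), hr0]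
            · rw [beq_iff_eq, h, hpc, hr0]
          have h5' : (r0 :: run2 ++ [p]).length = 5 := by simpa using h5
          have step : pvF (r0 :: (run2 ++ p :: rest')) =
              if ((r0 :: (run2 ++ p :: rest')).take 5).length = 5 ∧
                  (((r0 :: (run2 ++ p :: rest')).take 5).all fun x => x.2.2 == r0.2.2) = true
              then some ((r0 :: (run2 ++ p :: rest')).take 5)
              else pvF (run2 ++ p :: rest') := rfl
          have htake' : List.take 5 (r0 :: (run2 ++ p :: rest')) = r0 :: (run2 ++ [p]) := by
            simpa using htake
          show some (r0 :: (run2 ++ [p])) = pvF (r0 :: (run2 ++ p :: rest'))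
          rw [step, htake']
          exact (if_pos ⟨h5', hall5⟩).symm
      · rw [if_neg h5]
        have := ih (run ++ [p]) c (by simp) (by simp at hlen h5 ⊢; omega)
          (by intro r hr
              rcases List.mem_append.mp hr with h | h
              · exact hall r h
              · rw [List.mem_singleton.mp h]; exact hpc)
        rw [this, List.append_assoc, List.singleton_append]
    · rw [if_neg hpq]
      have h1 : ¬(([p] : List (Int × Int × Int)).length = 5) := by simp
      rw [if_neg h1]
      have := ih [p] p.2.2 (by simp) (by simp) (by simp)
      rw [this, List.singleton_append]
      exact (pvF_skip c p rest'
        (fun h => hpq (by rw [beq_iff_eq, h, hqc])) run hall hlen).symm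

theorem pvScanB_eq_pvF (l : List (Int × Int × Int)) : pvScanB [] l = pvF l := by
  cases l with
  | nil => rfl
  | cons p rest =>
    simp only [pvScanB, List.getLast?_nil, List.length_cons, List.length_nil]
    rw [if_neg (by omega)]
    exact pvScanB_run rest [p] p.2.2 (by simp) (by simp) (by simp)

theorem pvGroup_eq (pieces : List (Int × Int × Int)) : pvGroupB pieces = pvGroupA pieces := by
  unfold pvGroupA pvGroupB pvAdd
  rfl

theorem pvScans_eq : pvScanB [] = pvScanA := by
  funext l; rw [pvScanB_eq_pvF, pvScanA_eq_pvF]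

theorem values_findSome? (d : PySem.Dict Int (List (Int × Int × Int)))
    (f : List (Int × Int × Int) → Option (List (Int × Int × Int))) :
    d.values.findSome? f = d.items.findSome? (fun kv => f kv.2) := by
  simp only [PySem.Dict.values, List.findSome?_map, Function.comp_def]

-- ===== VERDICT (by name: the statement is the Claim_ definition above) =====
theorem find_five_pieces_spec : Claim_equal_find_five_pieces := by
  intro pieces _
  unfold Spec_find_five_pieces find_five_pieces find_five_pieces_alt
  rw [pvGroup_eq]
  simp only [List.findSome?_cons, List.findSome?_nil, values_findSome?, pvScans_eq]
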